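-- pv_equiv track=rewrite | github.com/WiebedeBoer/robotica5 | vision/Imp_Functions/Obj_detection/FM_ORB.py | findRectanglePoints
-- ===== SOURCE A (Python) =====
-- def findRectanglePoints(pts):
--     minXmaxY = None
--     maxXminY = None
--
--     for p in pts:
--         if minXmaxY is None or maxXminY is None:
--             minXmaxY = [p[0][0], p[0][1]]
--             maxXminY = [p[0][0], p[0][1]]
--
--         if p[0][0] < minXmaxY[0]: minXmaxY[0] = p[0][0]
--         if p[0][0] > maxXminY[0]: maxXminY[0] = p[0][0]
--
--         if p[0][1] < maxXminY[1]: maxXminY[1] = p[0][1]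
--         if p[0][1] > minXmaxY[1]: minXmaxY[1] = p[0][1]
--
--     return [minXmaxY, maxXminY]
-- ===== SOURCE B (Python) =====
-- def findRectanglePoints(pts):
--     if not pts:
--         return [None, None]
--     minX = min(p[0][0] for p in pts)
--     maxX = max(p[0][0] for p in pts)
--     minY = min(p[0][1] for p in pts)
--     maxY = max(p[0][1] for p in pts)
--     return [[minX, maxY], [maxX, minY]]
-- ===== Notes on version B (the rewrite author's own statement) =====
-- stated objective: idiomatic
-- what changed: A's single fused loop that mutates two running [x,y] lists with four guarded assignments is replaced by an empty-guard plus four independent built-in min/max scans over generator expressions, assembled into the result at the end.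
-- outside the precondition, e.g. on findRectanglePoints([]): A returns [None, None], B returns [None, None]; on findRectanglePoints([[[1]]]): A raises IndexError, B raises IndexError; on findRectanglePoints([[]]): A raises IndexError, B raises IndexError
import Mathlib
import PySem

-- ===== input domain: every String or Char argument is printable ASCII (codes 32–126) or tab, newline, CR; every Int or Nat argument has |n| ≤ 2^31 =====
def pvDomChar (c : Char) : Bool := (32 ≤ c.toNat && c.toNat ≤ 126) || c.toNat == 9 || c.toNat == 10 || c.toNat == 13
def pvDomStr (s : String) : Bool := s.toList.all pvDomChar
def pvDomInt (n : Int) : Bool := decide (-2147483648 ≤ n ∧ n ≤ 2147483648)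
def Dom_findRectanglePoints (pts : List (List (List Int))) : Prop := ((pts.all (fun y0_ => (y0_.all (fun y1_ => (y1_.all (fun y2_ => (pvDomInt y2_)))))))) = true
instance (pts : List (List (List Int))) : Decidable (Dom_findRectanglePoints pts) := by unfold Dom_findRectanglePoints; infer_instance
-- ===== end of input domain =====

-- B replaces A's fused mutating loop by an empty guard and four independent min/max scans (idiomatic; same cost).
-- Pre_ excludes the empty list (A returns [None, None], which is not a list of int pairs) and rows whose p[0][0]/p[0][1]
-- access raises IndexError.

-- ===== PORT A =====
-- p[0][0] / p[0][1]; the .getD defaults are never reached on Pre_ (Pre_ excludes the IndexError inputs).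
def pv00 (p : List (List Int)) : Int := (PySem.List.pyGet? ((PySem.List.pyGet? p 0).getD []) 0).getD 0
def pv01 (p : List (List Int)) : Int := (PySem.List.pyGet? ((PySem.List.pyGet? p 0).getD []) 1).getD 0

-- A's loop body: the None-initialisation branch, then the four guarded item assignments, in A's order.
def pvStepA (st : Option (List Int) × Option (List Int)) (p : List (List Int)) :
    Option (List Int) × Option (List Int) :=
  let st := if st.1 = none ∨ st.2 = none then
              (some [pv00 p, pv01 p], some [pv00 p, pv01 p]) else st
  let m := st.1.getD []
  let M := st.2.getD []
  let m := if pv00 p < (PySem.List.pyGet? m 0).getD 0 then m.set 0 (pv00 p) else m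
  let M := if pv00 p > (PySem.List.pyGet? M 0).getD 0 then M.set 0 (pv00 p) else M
  let M := if pv01 p < (PySem.List.pyGet? M 1).getD 0 then M.set 1 (pv01 p) else M
  let m := if pv01 p > (PySem.List.pyGet? m 1).getD 0 then m.set 1 (pv01 p) else m
  (some m, some M)

def findRectanglePoints (pts : List (List (List Int))) : List (List Int) :=
  let st := pts.foldl pvStepA (none, none)
  -- Python returns [minXmaxY, maxXminY]; on Pre_ both are 'some' ([None, None] is excluded by Pre_).
  [st.1.getD [], st.2.getD []]

-- ===== PORT B =====
def findRectanglePoints_alt (pts : List (List (List Int))) : List (List Int) :=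
  if pts = [] then [[], []]  -- Source B returns [None, None] here; excluded by Pre_ (untypable as List (List Int))
  else
    let minX := (PySem.List.min? (pts.map pv00) (fun x => x)).getD 0
    let maxX := (PySem.List.max? (pts.map pv00) (fun x => x)).getD 0
    let minY := (PySem.List.min? (pts.map pv01) (fun x => x)).getD 0
    let maxY := (PySem.List.max? (pts.map pv01) (fun x => x)).getD 0
    [[minX, maxY], [maxX, minY]]

-- ===== PRECONDITION & SPEC =====
-- Pre_ excludes: the empty list, on which A returns [None, None] (not a value of the declared return type),
-- and inputs where some p has no p[0] or p[0] has fewer than 2 entries, on which A raises IndexError.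
def Pre_findRectanglePoints (pts : List (List (List Int))) : Prop :=
  pts ≠ [] ∧ ∀ p ∈ pts, p ≠ [] ∧ 2 ≤ (p.headD []).length
instance (pts : List (List (List Int))) : Decidable (Pre_findRectanglePoints pts) := by
  unfold Pre_findRectanglePoints; infer_instance

def pvWitness_findRectanglePoints : List (List (List Int)) := [[[3, 4]], [[1, 9]], [[5, 2]]]

def Spec_findRectanglePoints (pts : List (List (List Int))) (out : List (List Int)) : Prop := out = findRectanglePoints_alt pts
instance (pts : List (List (List Int))) (out : List (List Int)) : Decidable (Spec_findRectanglePoints pts out) := by unfold Spec_findRectanglePoints; infer_instance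

-- ===== CLAIM (what is proved, stated in full; the proofs are below) =====
def Claim_equal_findRectanglePoints : Prop := ∀ (pts : List (List (List Int))), Dom_findRectanglePoints pts → Pre_findRectanglePoints pts → Spec_findRectanglePoints pts (findRectanglePoints pts)

-- ===== LEMMAS AND PROOFS =====

-- Once both accumulators are two-element 'some' lists, A's step keeps running min/max of pv00/pv01.
lemma pvStepA_some (a b c d : Int) (p : List (List Int)) :
    pvStepA (some [a, b], some [c, d]) p =
      (some [min a (pv00 p), max b (pv01 p)], some [max c (pv00 p), min d (pv01 p)]) := by
  simp only [pvStepA, reduceCtorEq, or_self, if_false, Option.getD_some]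
  split_ifs <;> simp_all [PySem.List.pyGet?, PySem.List.pyIdx?, List.set, min_def, max_def] <;> omega

-- Loop invariant over the tail.
lemma pvLoopA (l : List (List (List Int))) : ∀ (a b c d : Int),
    l.foldl pvStepA (some [a, b], some [c, d]) =
      (some [(l.map pv00).foldl min a, (l.map pv01).foldl max b],
       some [(l.map pv00).foldl max c, (l.map pv01).foldl min d]) := by
  induction l with
  | nil => intro a b c d; simp
  | cons p t ih =>
      intro a b c d
      simp only [List.foldl_cons, List.map_cons, pvStepA_some, ih]

theorem findRectanglePoints_spec : Claim_equal_findRectanglePoints := by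
  unfold Claim_equal_findRectanglePoints
  intro pts _ hpre
  obtain ⟨hne, -⟩ := hpre
  unfold Spec_findRectanglePoints findRectanglePoints findRectanglePoints_alt
  obtain ⟨p, t, rfl⟩ := List.exists_cons_of_ne_nil hne
  have h0 : pvStepA (none, none) p = (some [pv00 p, pv01 p], some [pv00 p, pv01 p]) := by
    simp [pvStepA, PySem.List.pyGet?]
  simp only [List.foldl_cons, h0, pvLoopA, List.map_cons, if_neg (List.cons_ne_nil p t),
    PySem.List.min?_id_cons, PySem.List.max?_id_cons, Option.getD_some]
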